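-- pv_equiv track=rewrite | github.com/seunghyeon528/Face_Lip_detection_tracking | utils_vid.py | check_bbox_min_max
-- ===== SOURCE A (Python) =====
-- def check_bbox_min_max(corrected_boxes,label_list):
--     minmax_checked_boxes = []
--     for i,bbox in enumerate(corrected_boxes):
--         [ymin,xmin,ymax,xmax] = bbox
--         if (ymin < ymax) and (xmin < xmax):
--             minmax_checked_boxes.append(bbox)
--         else:
--             if i == 0:
--                 minmax_checked_boxes.append(label_list[-1])
--             else:
--                 minmax_checked_boxes.append(minmax_checked_boxes[i-1])
--     return minmax_checked_boxes
-- ===== SOURCE B (Python) =====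
-- def check_bbox_min_max(corrected_boxes, label_list):
--     # staged passes: validity flags, forward-fill of last-valid index, then map indices to boxes
--     valid = [(ymin < ymax) and (xmin < xmax) for ymin, xmin, ymax, xmax in corrected_boxes]
--     last = []
--     j = -1
--     for i, v in enumerate(valid):
--         if v:
--             j = i
--         last.append(j)
--     return [corrected_boxes[j] if j >= 0 else label_list[-1] for j in last]
-- ===== Notes on version B (the rewrite author's own statement) =====
-- stated objective: alternative
-- what changed: Replaces the single self-referential pass (output[i-1] back-index / i==0 special case) by three staged passes: compute validity flags, forward-fill a last-valid-index array, then map each index to its box (or label_list[-1] when the index is -1) -- the output is never read back.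
import Mathlib
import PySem

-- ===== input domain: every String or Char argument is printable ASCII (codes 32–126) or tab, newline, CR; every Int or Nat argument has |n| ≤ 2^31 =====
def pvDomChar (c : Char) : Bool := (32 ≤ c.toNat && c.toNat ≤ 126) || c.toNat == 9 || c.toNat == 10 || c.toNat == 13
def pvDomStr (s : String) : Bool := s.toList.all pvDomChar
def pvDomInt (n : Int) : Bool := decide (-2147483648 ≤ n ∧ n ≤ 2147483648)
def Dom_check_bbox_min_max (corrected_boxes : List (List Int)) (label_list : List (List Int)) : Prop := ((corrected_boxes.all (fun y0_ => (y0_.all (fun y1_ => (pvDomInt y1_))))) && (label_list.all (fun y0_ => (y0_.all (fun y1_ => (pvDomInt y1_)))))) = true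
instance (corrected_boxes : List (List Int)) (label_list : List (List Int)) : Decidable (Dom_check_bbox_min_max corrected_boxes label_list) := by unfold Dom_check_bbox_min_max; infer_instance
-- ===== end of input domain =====

-- ===== PORT A =====
-- B replaces A's single self-referential pass by three staged passes (flags, last-valid-index array, index→box map); same cost, no back-reads of the output.
-- goA carries the enumerate counter i and the growing output list, indexing back into it exactly as A does.
def goA (label_list : List (List Int)) : List (List Int) → Nat → List (List Int) → List (List Int)
  | [], _, acc => acc
  | bbox :: rest, i, acc =>
    match bbox with
    | [ymin, xmin, ymax, xmax] =>
      let nb := if ymin < ymax ∧ xmin < xmax then bbox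
        else if i = 0 then (PySem.List.pyGet? label_list (-1)).getD []
        else (PySem.List.pyGet? acc ((i : Int) - 1)).getD []
      goA label_list rest (i + 1) (acc ++ [nb])
    | _ => acc  -- the 4-element unpacking fails: Python raises ValueError, excluded by Pre_

def check_bbox_min_max (corrected_boxes : List (List Int)) (label_list : List (List Int)) : List (List Int) :=
  goA label_list corrected_boxes 0 []

-- ===== PORT B =====
-- pass 1: the validity flag of one box ('for ymin,xmin,ymax,xmax in ...' unpacking; a malformed box raises in Python, excluded by Pre_)
def validB (b : List Int) : Bool :=
  match b with
  | [ymin, xmin, ymax, xmax] => decide (ymin < ymax ∧ xmin < xmax)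
  | _ => false

-- pass 2 loop step: state is (last, j)
def stepIdx (st : List Int × Int) (p : Int × Bool) : List Int × Int :=
  let j := if p.2 then p.1 else st.2
  (st.1 ++ [j], j)

def check_bbox_min_max_alt (corrected_boxes : List (List Int)) (label_list : List (List Int)) : List (List Int) :=
  -- pass 1: valid = [...]; pass 2: last-valid-index array via foldl over enumerate; pass 3: index → box map
  (((PySem.List.enumerate (corrected_boxes.map validB) 0).foldl stepIdx ([], -1)).1).map
    (fun j => if 0 ≤ j then (PySem.List.pyGet? corrected_boxes j).getD []
              else (PySem.List.pyGet? label_list (-1)).getD [])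

-- ===== PRECONDITION & SPEC =====
def validBox (b : List Int) : Bool :=
  match b with
  | [ymin, xmin, ymax, xmax] => decide (ymin < ymax ∧ xmin < xmax)
  | _ => false

-- Pre_ excludes exactly the inputs where Python A raises: a box that is not a 4-element list
-- (ValueError on unpacking), or a first box that is invalid while label_list is empty (IndexError).
def Pre_check_bbox_min_max (corrected_boxes : List (List Int)) (label_list : List (List Int)) : Prop :=
  (∀ b ∈ corrected_boxes, b.length = 4) ∧
  (∀ b, corrected_boxes.head? = some b → (validBox b = true ∨ label_list ≠ []))

instance (corrected_boxes : List (List Int)) (label_list : List (List Int)) : Decidable (Pre_check_bbox_min_max corrected_boxes label_list) := by unfold Pre_check_bbox_min_max; infer_instance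

def pvWitness_check_bbox_min_max : List (List Int) × List (List Int) :=
  ([[0, 0, 1, 1], [2, 2, 1, 1]], [[0, 0, 5, 5]])

def Spec_check_bbox_min_max (corrected_boxes : List (List Int)) (label_list : List (List Int)) (out : List (List Int)) : Prop := out = check_bbox_min_max_alt corrected_boxes label_list
instance (corrected_boxes : List (List Int)) (label_list : List (List Int)) (out : List (List Int)) : Decidable (Spec_check_bbox_min_max corrected_boxes label_list out) := by unfold Spec_check_bbox_min_max; infer_instance

-- ===== CLAIM (what is proved, stated in full; the proofs are below) =====
def Claim_equal_check_bbox_min_max : Prop := ∀ (corrected_boxes : List (List Int)) (label_list : List (List Int)), Dom_check_bbox_min_max corrected_boxes label_list → Pre_check_bbox_min_max corrected_boxes label_list → Spec_check_bbox_min_max corrected_boxes label_list (check_bbox_min_max corrected_boxes label_list)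

-- ===== LEMMAS AND PROOFS =====

-- reference recursion: carry the previously emitted box (seeded with label_list[-1])
def refF : List (List Int) → List Int → List (List Int)
  | [], _ => []
  | b :: rest, p => let cur := if validB b then b else p; cur :: refF rest cur

lemma pyGet_last (xs : List (List Int)) (p : List Int) (h : xs.getLast? = some p) :
    (PySem.List.pyGet? xs ((xs.length : Int) - 1)).getD [] = p := by
  have hne : xs ≠ [] := by rintro rfl; simp at h
  have hlen : 0 < xs.length := List.length_pos_iff.mpr hne
  have : ((xs.length : Int) - 1) = ((xs.length - 1 : Nat) : Int) := by omega
  rw [this, PySem.List.pyGet?_natCast]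
  rw [List.getLast?_eq_getElem?] at h
  simp [h]

-- A equals the reference recursion
lemma keyA (label_list : List (List Int)) :
    ∀ (cb : List (List Int)) (out : List (List Int)),
      (∀ b ∈ cb, b.length = 4) →
      goA label_list cb out.length out =
        out ++ refF cb (out.getLast?.getD ((PySem.List.pyGet? label_list (-1)).getD [])) := by
  intro cb
  induction cb with
  | nil => intro out _; simp [goA, refF]
  | cons b rest ih =>
    intro out hlen
    have hb : b.length = 4 := hlen b (by simp)
    obtain ⟨y, x, Y, X, rfl⟩ : ∃ y x Y X, b = [y, x, Y, X] := by
      rcases b with _ | ⟨y, _ | ⟨x, _ | ⟨Y, _ | ⟨X, _ | _⟩⟩⟩⟩ <;> simp_all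
    have hrest : ∀ b ∈ rest, b.length = 4 := fun b hm => hlen b (by simp [hm])
    by_cases hv : y < Y ∧ x < X
    · have h1 := ih (out ++ [[y, x, Y, X]]) hrest
      simp only [List.length_append, List.length_cons, List.length_nil, List.getLast?_concat,
        Option.getD_some] at h1
      simpa [goA, refF, hv, validB, List.append_assoc] using h1
    · rcases hout : out.getLast? with _ | p
      · have hnil : out = [] := by
          cases out with
          | nil => rfl
          | cons a as => simp [List.getLast?_eq_getElem?] at hout
        subst hnil
        have h1 := ih [(PySem.List.pyGet? label_list (-1)).getD []] hrest
        simp only [List.length_cons, List.length_nil, List.getLast?_singleton,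
          Option.getD_some] at h1
        simpa [goA, refF, hv, validB] using h1
      · have hne : out ≠ [] := by rintro rfl; simp at hout
        have hi0 : out.length ≠ 0 := by simpa [List.length_eq_zero_iff] using hne
        have hidx : (PySem.List.pyGet? out ((out.length : Int) - 1)).getD [] = p :=
          pyGet_last out p hout
        have h1 := ih (out ++ [p]) hrest
        simp only [List.length_append, List.length_cons, List.length_nil, List.getLast?_concat,
          Option.getD_some] at h1
        simpa [goA, refF, hv, validB, hi0, hidx, List.append_assoc] using h1

-- B's pass-2 foldl as a plain scan
def scanIdx : List (Int × Bool) → Int → List Int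
  | [], _ => []
  | p :: rest, j => let j' := if p.2 then p.1 else j; j' :: scanIdx rest j'

lemma foldl_stepIdx (l : List (Int × Bool)) :
    ∀ (acc : List Int) (j : Int), (l.foldl stepIdx (acc, j)).1 = acc ++ scanIdx l j := by
  induction l with
  | nil => intro acc j; simp [scanIdx]
  | cons p rest ih =>
    intro acc j
    simp [scanIdx, stepIdx, ih, List.append_assoc]

-- B's staged passes equal the reference recursion
lemma keyB (full label_list : List (List Int)) :
    ∀ (cb : List (List Int)) (i : Nat) (j : Int),
      full.drop i = cb → j < (i : Int) →
      (scanIdx (PySem.List.enumerate (cb.map validB) (i : Int)) j).map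
        (fun j => if 0 ≤ j then (PySem.List.pyGet? full j).getD []
                  else (PySem.List.pyGet? label_list (-1)).getD []) =
      refF cb (if 0 ≤ j then (PySem.List.pyGet? full j).getD []
               else (PySem.List.pyGet? label_list (-1)).getD []) := by
  intro cb
  induction cb with
  | nil => intro i j _ _; simp [scanIdx, refF, PySem.List.enumerate_nil]
  | cons b rest ih =>
    intro i j hdrop hj
    have hi : i < full.length := by
      by_contra h
      have : full.drop i = [] := List.drop_eq_nil_of_le (by omega)
      simp [this] at hdrop
    have hget : full[i]? = some b := by
      have h0 : (full.drop i)[0]? = some b := by simp [hdrop]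
      rw [List.getElem?_drop] at h0
      simpa using h0
    have hrest : full.drop (i + 1) = rest := by
      have h := congrArg (fun l => l.drop 1) hdrop
      simp only [List.drop_drop] at h
      simpa [Nat.add_comm] using h
    simp only [List.map_cons]
    rw [PySem.List.enumerate_cons]
    by_cases hv : validB b = true
    · have h1 := ih (i + 1) (i : Int) hrest (by omega)
      push_cast at h1 ⊢
      simp [scanIdx, refF, hv, h1, hget]
    · have h1 := ih (i + 1) j hrest (by omega)
      push_cast at h1 ⊢
      simp [scanIdx, refF, hv, h1]

-- ===== VERDICT (by name: the statement is the Claim_ definition above) =====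
theorem check_bbox_min_max_spec : Claim_equal_check_bbox_min_max := by
  intro cb ll _ hpre
  unfold Spec_check_bbox_min_max check_bbox_min_max check_bbox_min_max_alt
  have hA := keyA ll cb [] hpre.1
  have hB := keyB cb ll cb 0 (-1) (by simp) (by norm_num)
  simp only [List.length_nil] at hA
  rw [hA, foldl_stepIdx]
  simp only [Nat.cast_zero] at hB
  norm_num at hB
  simp [hB]
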